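-- pv_equiv track=rewrite | github.com/MajidHJ/adventofcode | day2/inv2.py | find_invalids
-- ===== SOURCE A (Python) =====
-- def find_invalids(a,b):
--     ssum = 0
--     invalids = []
--
--     for i in range(a,b+1):
--         s = str(i)
--         l = len(s)
--         if l<2 : continue
--         for size in range(1,min(l,6)):
--             if l%size!=0 : continue
--             block = s[:size]
--             if s == block*(l//size) :
--                 invalids.append(s +'\n')
--                 ssum+= i
--                 break
--     return ssum,invalids
-- ===== SOURCE B (Python) =====
-- def find_invalids(a, b):
--     # Enumerate repeated-block numbers directly instead of scanning the range:
--     # a qualifying number is exactly str(block) repeated k>=2 times, block of 1..5 digits.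
--     nums = set()
--     for size in range(1, 6):
--         m = 10 ** size
--         for block in range(m // 10, m):
--             n = block * m + block          # k = 2 repetitions
--             while n <= b:
--                 if n >= a:
--                     nums.add(n)
--                 n = n * m + block          # one more repetition
--     ssum = 0
--     invalids = []
--     for n in sorted(nums):
--         ssum += n
--         invalids.append(str(n) + '\n')
--     return ssum, invalids
-- ===== Notes on version B (the rewrite author's own statement) =====
-- stated objective: alternative
-- what changed: Instead of scanning every integer in [a,b] and string-testing it for block periodicity, B directly enumerates all repeated-block numbers (a 1..5-digit block appended to itself k>=2 times, built arithmetically) that are <= b, keeps those >= a in a set, and emits them sorted; intended as faster on wide ranges (a timing run read 17.6x median at the largest size, but inconsistently, since on empty/tiny ranges both are instant), recorded label: none.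
import Mathlib
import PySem

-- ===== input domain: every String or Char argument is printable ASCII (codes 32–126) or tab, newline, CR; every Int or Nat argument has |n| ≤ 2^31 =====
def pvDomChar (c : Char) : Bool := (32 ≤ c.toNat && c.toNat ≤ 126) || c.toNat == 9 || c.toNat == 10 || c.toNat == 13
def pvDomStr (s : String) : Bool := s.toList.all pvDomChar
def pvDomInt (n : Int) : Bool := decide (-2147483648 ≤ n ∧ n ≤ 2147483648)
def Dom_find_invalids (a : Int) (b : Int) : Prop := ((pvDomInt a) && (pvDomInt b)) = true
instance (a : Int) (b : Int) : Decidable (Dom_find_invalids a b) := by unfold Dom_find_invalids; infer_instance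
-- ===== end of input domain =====

-- B enumerates the repeated-block numbers (a 1..5-digit block appended to itself k ≥ 2 times)
-- up to b directly and sorts them, instead of A's per-integer string test over the whole range [a, b].


-- ===== PORT A =====
-- inner 'for size in range(1, min(l,6)): … break' — returns whether some size fires
-- (the loop body's effect on (ssum, invalids) does not depend on WHICH size fires, so the
--  first-match break is the same as existence; string comparison/repetition is done on the
--  character lists, which is exact: CPython compares/multiplies str by its character sequence)
def pvFoundA (cs : List Char) (l : Int) : List Int → Bool
  | [] => false
  | size :: rest =>
      if PySem.Int.mod l size ≠ 0 then pvFoundA cs l rest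
      else if cs = PySem.List.pyRepeat (PySem.List.slice cs none (some size)) (PySem.Int.floordiv l size)
      then true
      else pvFoundA cs l rest

def find_invalids (a : Int) (b : Int) : Int × List String :=
  (PySem.List.pyRange a (b + 1) 1).foldl
    (fun st i =>
      let s := PySem.Int.toStr i
      let cs := s.toList
      let l : Int := PySem.Str.len s
      if l < 2 then st
      else if pvFoundA cs l (PySem.List.pyRange 1 (min l 6) 1) then
        (st.1 + i, st.2 ++ [s ++ "\n"])
      else st)
    (0, [])

-- ===== PORT B =====
-- 'while n <= b: (if n >= a: nums.add(n)); n = n*m + block' — the dite's else-branch is an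
-- unreachable totality guard (callers always pass 1 ≤ block < m, 10 ≤ m, so n < n*m + block)
def pvWhileB (a b m block : Int) (n : Int) (nums : PySem.Set Int) : PySem.Set Int :=
  if b < n then nums
  else
    let nums' := if a ≤ n then PySem.Set.add nums n else nums
    if _h : n < n * m + block then pvWhileB a b m block (n * m + block) nums'
    else nums'
termination_by (b + 1 - n).toNat
decreasing_by omega

def find_invalids_alt (a : Int) (b : Int) : Int × List String :=
  let nums : PySem.Set Int :=
    (PySem.List.pyRange 1 6 1).foldl (fun nums size =>
      let m : Int := 10 ^ size.toNat          -- 10 ** size (size ≥ 0 on this range: exact)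
      (PySem.List.pyRange (PySem.Int.floordiv m 10) m 1).foldl (fun nums block =>
        pvWhileB a b m block (block * m + block) nums) nums) PySem.Set.empty
  (PySem.List.sorted nums (fun x => x) false).foldl
    (fun st n => (st.1 + n, st.2 ++ [PySem.Int.toStr n ++ "\n"])) (0, [])

-- ===== PRECONDITION & SPEC =====
def Spec_find_invalids (a : Int) (b : Int) (out : Int × List String) : Prop := out = find_invalids_alt a b
instance (a : Int) (b : Int) (out : Int × List String) : Decidable (Spec_find_invalids a b out) := by unfold Spec_find_invalids; infer_instance

-- ===== CLAIM (what is proved, stated in full; the proofs are below) =====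
def Claim_equal_find_invalids : Prop := ∀ (a : Int) (b : Int), Dom_find_invalids a b → Spec_find_invalids a b (find_invalids a b)

-- ===== LEMMAS AND PROOFS =====

-- the update applied to the accumulator for each qualifying number
def pvUpd (st : Int × List String) (n : Int) : Int × List String :=
  (st.1 + n, st.2 ++ [PySem.Int.toStr n ++ "\n"])

-- A's per-number test, as a Bool
def pvValid (i : Int) : Bool :=
  let cs := (PySem.Int.toStr i).toList
  let l : Int := PySem.Str.len (PySem.Int.toStr i)
  !(l < 2) && pvFoundA cs l (PySem.List.pyRange 1 (min l 6) 1)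

-- 1 + m + m² + … + m^(k-1)
def pvGeom (m : Int) : Nat → Int
  | 0 => 0
  | k + 1 => pvGeom m k * m + 1

def pvNGeom (m : Nat) : Nat → Nat
  | 0 => 0
  | k + 1 => pvNGeom m k * m + 1

-- the numbers B enumerates
def pvForm (x : Int) : Prop :=
  ∃ size : Nat, 1 ≤ size ∧ size ≤ 5 ∧
    ∃ v : Int, 10 ^ (size - 1) ≤ v ∧ v < 10 ^ size ∧
      ∃ k : Nat, 2 ≤ k ∧ x = v * pvGeom (10 ^ size) k

-- the successive values of B's while loop
def pvIter (m block n : Int) : Nat → Int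
  | 0 => n
  | j + 1 => pvIter m block n j * m + block

theorem pvGeom_eq_ngeom (m k : Nat) : pvGeom (m : Int) k = (pvNGeom m k : Int) := by
  induction k with
  | zero => rfl
  | succ k ih => simp only [pvGeom, pvNGeom, ih]; push_cast; ring

theorem pvIter_eq_geom (m block : Int) (j : Nat) :
    pvIter m block (block * m + block) j = block * pvGeom m (j + 2) := by
  induction j with
  | zero => simp [pvIter, pvGeom]; ring
  | succ j ih => simp [pvIter, ih, pvGeom]; ring

theorem pvIter_pos (m block n : Int) (hm : 10 ≤ m) (hb : 1 ≤ block) (hn : 1 ≤ n) (j : Nat) :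
    1 ≤ pvIter m block n j := by
  induction j with
  | zero => simpa [pvIter]
  | succ j ih => simp only [pvIter]; nlinarith

theorem pvIter_lt_succ (m block n : Int) (hm : 10 ≤ m) (hb : 1 ≤ block) (hn : 1 ≤ n) (j : Nat) :
    pvIter m block n j < pvIter m block n (j + 1) := by
  have h := pvIter_pos m block n hm hb hn j
  simp only [pvIter]
  nlinarith

theorem pvIter_ge (m block n : Int) (hm : 10 ≤ m) (hb : 1 ≤ block) (hn : 1 ≤ n) (j : Nat) :
    n ≤ pvIter m block n j := by
  induction j with
  | zero => simp [pvIter]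
  | succ j ih =>
      have := pvIter_lt_succ m block n hm hb hn j
      simp only [pvIter] at *
      omega

theorem pvIter_shift (m block n : Int) (j : Nat) :
    pvIter m block (n * m + block) j = pvIter m block n (j + 1) := by
  induction j with
  | zero => simp [pvIter]
  | succ j ih => simp only [pvIter] at *; rw [ih]

-- membership in B's while loop result
theorem pvWhileB_mem (a b m block : Int) (hm : 10 ≤ m) (hb : 1 ≤ block) :
    ∀ (n : Int) (nums : PySem.Set Int), 1 ≤ n →
    ∀ x, x ∈ pvWhileB a b m block n nums ↔
      x ∈ nums ∨ ∃ j : Nat, x = pvIter m block n j ∧ a ≤ x ∧ x ≤ b := by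
  have main : ∀ (fuel : Nat) (n : Int) (nums : PySem.Set Int), (b + 1 - n).toNat ≤ fuel → 1 ≤ n →
      ∀ x, x ∈ pvWhileB a b m block n nums ↔
        x ∈ nums ∨ ∃ j : Nat, x = pvIter m block n j ∧ a ≤ x ∧ x ≤ b := by
    intro fuel
    induction fuel with
    | zero =>
        intro n nums hfuel hn x
        have hbn : b < n := by omega
        rw [pvWhileB, if_pos hbn]
        constructor
        · exact Or.inl
        · rintro (h | ⟨j, rfl, ha, hxb⟩)
          · exact h
          · exact absurd (le_trans (pvIter_ge m block n hm hb hn j) hxb) (by omega)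
    | succ fuel ih =>
        intro n nums hfuel hn x
        by_cases hbn : b < n
        · rw [pvWhileB, if_pos hbn]
          constructor
          · exact Or.inl
          · rintro (h | ⟨j, rfl, ha, hxb⟩)
            · exact h
            · exact absurd (le_trans (pvIter_ge m block n hm hb hn j) hxb) (by omega)
        · have hlt : n < n * m + block := by nlinarith
          rw [pvWhileB, if_neg hbn]
          simp only [dif_pos hlt]
          rw [ih (n * m + block) _ (by omega) (by omega) x]
          have hmem : ∀ y : Int,
              y ∈ (if a ≤ n then PySem.Set.add nums n else nums) ↔
              y ∈ nums ∨ (a ≤ n ∧ y = n) := by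
            intro y
            split_ifs with han
            · rw [PySem.Set.mem_add]; tauto
            · constructor
              · exact Or.inl
              · rintro (h | ⟨h1, h2⟩)
                · exact h
                · exact absurd h1 han
          rw [hmem]
          constructor
          · rintro ((h | ⟨han, rfl⟩) | ⟨j, rfl, ha, hxb⟩)
            · exact Or.inl h
            · exact Or.inr ⟨0, rfl, han, by omega⟩
            · exact Or.inr ⟨j + 1, by rw [← pvIter_shift], ha, hxb⟩
          · rintro (h | ⟨j, rfl, ha, hxb⟩)
            · exact Or.inl (Or.inl h)
            · cases j with
              | zero => exact Or.inl (Or.inr ⟨ha, rfl⟩)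
              | succ j => exact Or.inr ⟨j, by rw [pvIter_shift], ha, hxb⟩
  intro n nums hn x
  exact main (b + 1 - n).toNat n nums le_rfl hn x

theorem pvWhileB_nodup (a b m block : Int) (n : Int) (nums : PySem.Set Int)
    (h : nums.Nodup) : (pvWhileB a b m block n nums).Nodup := by
  by_cases hbn : b < n
  · rw [pvWhileB, if_pos hbn]; exact h
  · rw [pvWhileB, if_neg hbn]
    have h' : (if a ≤ n then PySem.Set.add nums n else nums).Nodup := by
      split_ifs with han
      · exact PySem.Set.nodup_add nums n h
      · exact h
    by_cases hlt : n < n * m + block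
    · simp only [dif_pos hlt]; exact pvWhileB_nodup a b m block _ _ h'
    · simp only [dif_neg hlt]; exact h'
termination_by (b + 1 - n).toNat
decreasing_by omega

theorem pvFoldBlocks_mem (a b m : Int) (hm : 10 ≤ m) (blocks : List Int)
    (hpos : ∀ blk ∈ blocks, 1 ≤ blk) :
    ∀ (nums : PySem.Set Int) (x : Int),
    x ∈ blocks.foldl (fun nums blk => pvWhileB a b m blk (blk * m + blk) nums) nums ↔
      x ∈ nums ∨ ∃ blk ∈ blocks, ∃ k : Nat, 2 ≤ k ∧ x = blk * pvGeom m k ∧ a ≤ x ∧ x ≤ b := by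
  induction blocks with
  | nil => simp
  | cons blk rest ih =>
      intro nums x
      have hblk : 1 ≤ blk := hpos blk (by simp)
      have hn : 1 ≤ blk * m + blk := by nlinarith
      rw [List.foldl_cons, ih (fun y hy => hpos y (by simp [hy])),
        pvWhileB_mem a b m blk hm hblk _ nums hn]
      constructor
      · rintro ((h | ⟨j, rfl, ha, hxb⟩) | ⟨y, hy, k, hk, rfl, ha, hxb⟩)
        · exact Or.inl h
        · exact Or.inr ⟨blk, by simp, j + 2, by omega,
            by rw [← pvIter_eq_geom], ha, hxb⟩
        · exact Or.inr ⟨y, by simp [hy], k, hk, rfl, ha, hxb⟩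
      · rintro (h | ⟨y, hy, k, hk, rfl, ha, hxb⟩)
        · exact Or.inl (Or.inl h)
        · rcases List.mem_cons.mp hy with rfl | hy'
          · exact Or.inl (Or.inr ⟨k - 2, by
              rw [pvIter_eq_geom, show k - 2 + 2 = k from by omega], ha, hxb⟩)
          · exact Or.inr ⟨y, hy', k, hk, rfl, ha, hxb⟩

theorem pvFoldBlocks_nodup (a b m : Int) (blocks : List Int) :
    ∀ (nums : PySem.Set Int), nums.Nodup →
    (blocks.foldl (fun nums blk => pvWhileB a b m blk (blk * m + blk) nums) nums).Nodup := by
  induction blocks with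
  | nil => intro nums h; exact h
  | cons blk rest ih =>
      intro nums h
      exact ih _ (pvWhileB_nodup a b m blk _ nums h)

theorem pvFoldSizes_mem (a b : Int) (sizes : List Int) (hs : ∀ s ∈ sizes, 1 ≤ s) :
    ∀ (nums : PySem.Set Int) (x : Int),
    x ∈ sizes.foldl (fun nums size =>
      let m : Int := 10 ^ size.toNat
      (PySem.List.pyRange (PySem.Int.floordiv m 10) m 1).foldl (fun nums block =>
        pvWhileB a b m block (block * m + block) nums) nums) nums ↔
      x ∈ nums ∨ ∃ s ∈ sizes, ∃ blk : Int,
        10 ^ (s.toNat - 1) ≤ blk ∧ blk < 10 ^ s.toNat ∧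
        ∃ k : Nat, 2 ≤ k ∧ x = blk * pvGeom (10 ^ s.toNat) k ∧ a ≤ x ∧ x ≤ b := by
  induction sizes with
  | nil => simp
  | cons s rest ih =>
      intro nums x
      have hs1 : 1 ≤ s := hs s (by simp)
      have hsz : 1 ≤ s.toNat := by omega
      have hm : (10 : Int) ≤ 10 ^ s.toNat := by
        calc (10 : Int) = 10 ^ 1 := by ring
        _ ≤ 10 ^ s.toNat := pow_le_pow_right₀ (by norm_num) hsz
      have hfd : PySem.Int.floordiv ((10 : Int) ^ s.toNat) 10 = 10 ^ (s.toNat - 1) := by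
        rw [PySem.Int.floordiv_eq_iff_of_pos (by norm_num)]
        have hpow : (10 : Int) ^ s.toNat = 10 ^ (s.toNat - 1) * 10 := by
          rw [← pow_succ]
          congr 1
          omega
        constructor
        · omega
        · nlinarith [pow_pos (show (0:Int) < 10 by norm_num) (s.toNat - 1)]
      have hposblk : ∀ blk ∈ PySem.List.pyRange (PySem.Int.floordiv ((10:Int) ^ s.toNat) 10) (10 ^ s.toNat) 1, 1 ≤ blk := by
        intro blk hblk
        rw [PySem.List.mem_pyRange_one] at hblk
        have : (1 : Int) ≤ 10 ^ (s.toNat - 1) := one_le_pow₀ (by norm_num)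
        omega
      rw [List.foldl_cons, ih (fun y hy => hs y (by simp [hy]))]
      simp only
      rw [pvFoldBlocks_mem a b _ hm _ hposblk]
      constructor
      · rintro ((h | ⟨blk, hblk, k, hk, rfl, ha, hxb⟩) | ⟨y, hy, rest'⟩)
        · exact Or.inl h
        · rw [PySem.List.mem_pyRange_one, hfd] at hblk
          exact Or.inr ⟨s, by simp, blk, hblk.1, hblk.2, k, hk, rfl, ha, hxb⟩
        · exact Or.inr ⟨y, by simp [hy], rest'⟩
      · rintro (h | ⟨y, hy, blk, hb1, hb2, k, hk, rfl, ha, hxb⟩)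
        · exact Or.inl (Or.inl h)
        · rcases List.mem_cons.mp hy with rfl | hy'
          · refine Or.inl (Or.inr ⟨blk, ?_, k, hk, rfl, ha, hxb⟩)
            rw [PySem.List.mem_pyRange_one, hfd]
            exact ⟨hb1, hb2⟩
          · exact Or.inr ⟨y, hy', blk, hb1, hb2, k, hk, rfl, ha, hxb⟩

-- membership in B's finished set
theorem pvNums_mem (a b : Int) (x : Int) :
    x ∈ ((PySem.List.pyRange 1 6 1).foldl (fun nums size =>
      let m : Int := 10 ^ size.toNat
      (PySem.List.pyRange (PySem.Int.floordiv m 10) m 1).foldl (fun nums block =>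
        pvWhileB a b m block (block * m + block) nums) nums) (PySem.Set.empty : PySem.Set Int)) ↔
    (a ≤ x ∧ x ≤ b ∧ pvForm x) := by
  rw [pvFoldSizes_mem a b _ (by intro s hs; rw [PySem.List.mem_pyRange_one] at hs; omega)]
  constructor
  · rintro (h | ⟨s, hsmem, blk, hb1, hb2, k, hk, rfl, ha, hxb⟩)
    · simp [PySem.Set.empty] at h
    · rw [PySem.List.mem_pyRange_one] at hsmem
      exact ⟨ha, hxb, s.toNat, by omega, by omega, blk, hb1, hb2, k, hk, rfl⟩
  · rintro ⟨ha, hxb, sz, h1, h5, blk, hb1, hb2, k, hk, rfl⟩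
    refine Or.inr ⟨(sz : Int), ?_, blk, ?_, ?_, k, hk, rfl, ha, hxb⟩
    · rw [PySem.List.mem_pyRange_one]; omega
    · simpa using hb1
    · simpa using hb2

theorem pvNums_nodup (a b : Int) :
    ((PySem.List.pyRange 1 6 1).foldl (fun nums size =>
      let m : Int := 10 ^ size.toNat
      (PySem.List.pyRange (PySem.Int.floordiv m 10) m 1).foldl (fun nums block =>
        pvWhileB a b m block (block * m + block) nums) nums) (PySem.Set.empty : PySem.Set Int)).Nodup := by
  have main : ∀ (sizes : List Int) (nums : PySem.Set Int), nums.Nodup →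
      (sizes.foldl (fun nums size =>
        let m : Int := 10 ^ size.toNat
        (PySem.List.pyRange (PySem.Int.floordiv m 10) m 1).foldl (fun nums block =>
          pvWhileB a b m block (block * m + block) nums) nums) nums).Nodup := by
    intro sizes
    induction sizes with
    | nil => intro nums h; exact h
    | cons s rest ih => intro nums h; exact ih _ (pvFoldBlocks_nodup a b _ _ nums h)
  exact main _ _ List.nodup_nil

-- ===== the digit-string side =====

theorem pv_toDigitsCore_eq (fuel : Nat) : ∀ (n : Nat) (acc : List Char), 0 < n → n < 10 ^ fuel →
    Nat.toDigitsCore 10 fuel n acc = ((Nat.digits 10 n).map Nat.digitChar).reverse ++ acc := by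
  induction fuel with
  | zero => intro n acc h1 h2; omega
  | succ fuel ih =>
      intro n acc h1 h2
      rw [Nat.toDigitsCore]
      rw [Nat.digits_def' (by norm_num : 1 < 10) h1]
      by_cases h10 : n / 10 = 0
      · have : Nat.digits 10 (n / 10) = [] := by rw [h10]; rfl
        simp [h10]
      · have hlt : n / 10 < 10 ^ fuel := by
          rw [Nat.div_lt_iff_lt_mul (by norm_num)]
          calc n < 10 ^ (fuel + 1) := h2
          _ = 10 ^ fuel * 10 := by ring
        simp only [h10, if_false]
        rw [ih (n / 10) _ (Nat.pos_of_ne_zero h10) hlt]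
        simp

theorem pv_toDigits_eq (n : Nat) (h : 0 < n) :
    Nat.toDigits 10 n = ((Nat.digits 10 n).map Nat.digitChar).reverse := by
  have h2 : n < 10 ^ (n + 1) := by
    calc n < 10 ^ n := Nat.lt_pow_self (by norm_num)
    _ ≤ 10 ^ (n + 1) := Nat.pow_le_pow_right (by norm_num) (Nat.le_succ n)
  simpa using pv_toDigitsCore_eq (n + 1) n [] h h2

theorem pv_toDigits_zero : Nat.toDigits 10 0 = ['0'] := by decide

theorem pv_dc_inj : ∀ d < 10, ∀ e < 10, Nat.digitChar d = Nat.digitChar e → d = e := by decide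

theorem pv_dc_ne_dash : ∀ d < 10, Nat.digitChar d ≠ '-' := by decide

theorem pv_map_dc_inj : ∀ (L1 L2 : List Nat), (∀ x ∈ L1, x < 10) → (∀ x ∈ L2, x < 10) →
    L1.map Nat.digitChar = L2.map Nat.digitChar → L1 = L2 := by
  intro L1
  induction L1 with
  | nil => intro L2 _ _ h; cases L2 <;> simp_all
  | cons d L1 ih =>
      intro L2 h1 h2 h
      cases L2 with
      | nil => simp at h
      | cons e L2 =>
          simp only [List.map_cons, List.cons.injEq] at h
          have hd : d = e := pv_dc_inj d (h1 d (by simp)) e (h2 e (by simp)) h.1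
          rw [hd, ih L2 (fun x hx => h1 x (by simp [hx])) (fun x hx => h2 x (by simp [hx])) h.2]

theorem pv_flatten_length {α : Type} (k : Nat) (B : List α) :
    ((List.replicate k B).flatten).length = k * B.length := by
  induction k with
  | zero => simp
  | succ k ih => simp [List.replicate_succ, ih, Nat.succ_mul]; ring

theorem pv_flatten_comm {α : Type} (k : Nat) (B : List α) :
    (List.replicate k B).flatten ++ B = B ++ (List.replicate k B).flatten := by
  induction k with
  | zero => simp
  | succ k ih => simp only [List.replicate_succ, List.flatten_cons, List.append_assoc, ih]

theorem pv_flatten_succ_right {α : Type} (k : Nat) (B : List α) :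
    (List.replicate (k + 1) B).flatten = (List.replicate k B).flatten ++ B := by
  rw [List.replicate_succ, List.flatten_cons, pv_flatten_comm]

theorem pv_flatten_reverse {α : Type} (k : Nat) (B : List α) :
    ((List.replicate k B).flatten).reverse = (List.replicate k B.reverse).flatten := by
  induction k with
  | zero => simp
  | succ k ih =>
      rw [List.replicate_succ, List.flatten_cons, List.reverse_append, ih,
        pv_flatten_succ_right]

theorem pv_flatten_getLast? {α : Type} (k : Nat) (hk : 1 ≤ k) (B : List α) (hB : B ≠ []) :
    ((List.replicate k B).flatten).getLast? = B.getLast? := by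
  obtain ⟨k', rfl⟩ : ∃ k', k = k' + 1 := ⟨k - 1, by omega⟩
  rw [pv_flatten_succ_right, List.getLast?_eq_head?_reverse, List.getLast?_eq_head?_reverse,
    List.reverse_append]
  cases hRB : B.reverse with
  | nil => exact absurd (by simpa using hRB) hB
  | cons c t => simp

theorem pv_flatten_count {α : Type} [DecidableEq α] (k : Nat) (B : List α) (c : α) :
    ((List.replicate k B).flatten).count c = k * B.count c := by
  induction k with
  | zero => simp
  | succ k ih => simp [List.replicate_succ, List.count_append, ih, Nat.succ_mul]; ring

theorem pv_ofDigits_flatten (bd : List Nat) (k : Nat) :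
    Nat.ofDigits 10 ((List.replicate k bd).flatten) =
      Nat.ofDigits 10 bd * pvNGeom (10 ^ bd.length) k := by
  induction k with
  | zero => simp [pvNGeom]
  | succ k ih =>
      rw [List.replicate_succ, List.flatten_cons, Nat.ofDigits_append, ih]
      simp only [pvNGeom]
      ring

theorem pvNGeom_ge (m : Nat) (hm : 10 ≤ m) : ∀ k, 2 ≤ k → m + 1 ≤ pvNGeom m k := by
  intro k
  induction k with
  | zero => omega
  | succ k ih =>
      intro hk
      rcases Nat.lt_or_ge k 2 with h | h
      · have hk1 : k = 1 := by omega
        subst hk1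
        simp only [pvNGeom]
        nlinarith
      · have := ih h
        simp only [pvNGeom]
        nlinarith

theorem pv_toDigits_mem (n : Nat) (c : Char) (h : c ∈ Nat.toDigits 10 n) :
    ∃ d < 10, c = Nat.digitChar d := by
  rcases Nat.eq_zero_or_pos n with rfl | hn
  · rw [pv_toDigits_zero] at h
    simp at h
    exact ⟨0, by norm_num, by simp [h]; rfl⟩
  · rw [pv_toDigits_eq n hn] at h
    simp only [List.mem_reverse, List.mem_map] at h
    obtain ⟨d, hd, rfl⟩ := h
    exact ⟨d, Nat.digits_lt_base (by norm_num) hd, rfl⟩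

theorem pvFoundA_iff (cs : List Char) (l : Int) (sizes : List Int) :
    pvFoundA cs l sizes = true ↔ ∃ size ∈ sizes, PySem.Int.mod l size = 0 ∧
      cs = PySem.List.pyRepeat (PySem.List.slice cs none (some size)) (PySem.Int.floordiv l size) := by
  induction sizes with
  | nil => simp [pvFoundA]
  | cons size rest ih =>
      rw [pvFoundA]
      by_cases hmod : PySem.Int.mod l size ≠ 0
      · rw [if_pos hmod, ih]
        constructor
        · rintro ⟨y, hy, h⟩; exact ⟨y, by simp [hy], h⟩
        · rintro ⟨y, hy, h⟩
          rcases List.mem_cons.mp hy with rfl | hy'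
          · exact absurd h.1 hmod
          · exact ⟨y, hy', h⟩
      · have hmod : PySem.Int.mod l size = 0 := not_not.mp hmod
        rw [if_neg (by simp [hmod])]
        by_cases heq : cs = PySem.List.pyRepeat (PySem.List.slice cs none (some size)) (PySem.Int.floordiv l size)
        · rw [if_pos heq]
          simp only [true_iff]
          exact ⟨size, by simp, hmod, heq⟩
        · rw [if_neg heq, ih]
          constructor
          · rintro ⟨y, hy, h⟩; exact ⟨y, by simp [hy], h⟩
          · rintro ⟨y, hy, h⟩
            rcases List.mem_cons.mp hy with rfl | hy'
            · exact absurd h.2 heq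
            · exact ⟨y, hy', h⟩

-- the common decomposition of pvValid into its two tests
theorem pvValid_eq (x : Int) :
    pvValid x = (!(((PySem.Int.toChars x).length : Int) < 2) &&
      pvFoundA (PySem.Int.toChars x) ((PySem.Int.toChars x).length : Int)
        (PySem.List.pyRange 1 (min ((PySem.Int.toChars x).length : Int) 6) 1)) := by
  simp [pvValid, PySem.Str.len]

theorem pv_head?_take {α : Type} (E : List α) (sz : Nat) (h : 1 ≤ sz) :
    (E.take sz).head? = E.head? := by
  cases E with
  | nil => simp
  | cons e E' =>
      obtain ⟨sz', rfl⟩ : ∃ sz', sz = sz' + 1 := ⟨sz - 1, by omega⟩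
      simp

theorem pv_mem_flatten_replicate {α : Type} {c : α} {k : Nat} {B : List α}
    (h : c ∈ (List.replicate k B).flatten) : c ∈ B := by
  obtain ⟨l, hl, hc⟩ := List.mem_flatten.mp h
  rwa [List.eq_of_mem_replicate hl] at hc

theorem pvValid_iff_form_main (x : Int) (hx : 10 ≤ x) : pvValid x = true ↔ pvForm x := by
  have hn10 : 10 ≤ x.toNat := by omega
  have hxn : x = (x.toNat : Int) := by omega
  set n := x.toNat with hn
  have hchars : PySem.Int.toChars x = ((Nat.digits 10 n).map Nat.digitChar).reverse := by
    rw [PySem.Int.toChars, if_neg (by omega), pv_toDigits_eq n (by omega)]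
  set E : List Nat := (Nat.digits 10 n).reverse with hE
  have hcsE : PySem.Int.toChars x = E.map Nat.digitChar := by
    rw [hchars, hE, List.map_reverse]
  have hdigne : Nat.digits 10 n ≠ [] := Nat.digits_ne_nil_iff_ne_zero.mpr (by omega)
  have hElen2 : 2 ≤ E.length := by
    have := (Nat.lt_digits_length_iff (by norm_num : (1:Nat) < 10) n).mpr
      (show 10 ^ 1 ≤ n by simpa using hn10)
    simp only [hE, List.length_reverse]
    omega
  have hElt : ∀ d ∈ E, d < 10 := fun d hd =>
    Nat.digits_lt_base (by norm_num) (List.mem_reverse.mp hd)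
  have hlen : (PySem.Int.toChars x).length = E.length := by rw [hcsE, List.length_map]
  rw [pvValid_eq, Bool.and_eq_true, pvFoundA_iff]
  constructor
  · rintro ⟨-, size, hmem, hmod, hrep⟩
    rw [PySem.List.mem_pyRange_one] at hmem
    obtain ⟨hs1, hs2⟩ := hmem
    rw [hlen] at hs2 hmod hrep
    have hs6 : size < 6 := lt_of_lt_of_le hs2 (min_le_right _ _)
    have hsl : size < (E.length : Int) := lt_of_lt_of_le hs2 (min_le_left _ _)
    set sz : Nat := size.toNat with hsz
    have hsize : size = (sz : Int) := by omega
    have hszE : sz < E.length := by omega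
    have hdvd : sz ∣ E.length := by
      have := (PySem.Int.mod_eq_zero_iff_dvd _ _).mp hmod
      rw [hsize] at this
      exact_mod_cast Int.ofNat_dvd.mp (by exact_mod_cast this)
    obtain ⟨k, hkE⟩ := hdvd
    have hk2 : 2 ≤ k := by nlinarith [hkE, hszE, show 1 ≤ sz by omega]
    have hfd : PySem.Int.floordiv ((E.length : Int)) size = (k : Int) := by
      rw [PySem.Int.floordiv_eq_iff_of_pos (by omega), hsize, hkE]
      push_cast
      constructor <;> nlinarith [show (1:Int) ≤ (sz:Int) by omega]
    have hBchars : PySem.List.slice (PySem.Int.toChars x) none (some size) =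
        (PySem.Int.toChars x).take sz := PySem.List.slice_to _ (by omega)
    have hrep' : E.map Nat.digitChar =
        (List.replicate k ((E.take sz).map Nat.digitChar)).flatten := by
      conv_lhs => rw [← hcsE, hrep]
      rw [hBchars, hfd, hcsE, List.map_take]
      simp [PySem.List.pyRepeat]
    have hEeq : E = (List.replicate k (E.take sz)).flatten := by
      apply pv_map_dc_inj _ _ hElt
      · intro d hd
        exact hElt d (List.take_subset sz E (pv_mem_flatten_replicate hd))
      · rw [hrep', List.map_flatten, List.map_replicate]
    -- move to the little-endian digit list
    set bd : List Nat := (E.take sz).reverse with hbd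
    have hdigeq : Nat.digits 10 n = (List.replicate k bd).flatten := by
      have : E.reverse = (List.replicate k bd).flatten := by
        conv_lhs => rw [hEeq]
        rw [pv_flatten_reverse]
      rw [hE] at this
      simpa using this
    have hbdlen : bd.length = sz := by
      simp [hbd, List.length_take]
      omega
    set v : Nat := Nat.ofDigits 10 bd with hv
    have hnv : n = v * pvNGeom (10 ^ sz) k := by
      conv_lhs => rw [← Nat.ofDigits_digits 10 n, hdigeq]
      rw [pv_ofDigits_flatten, hbdlen]
    have hbdlt : ∀ d ∈ bd, d < 10 := by
      intro d hd
      exact hElt d (List.take_subset sz E (List.mem_reverse.mp hd))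
    have hbdne : bd ≠ [] := by
      intro h
      rw [h] at hbdlen
      simp at hbdlen
      omega
    have hbdlast : ∀ h : bd ≠ [], bd.getLast h ≠ 0 := by
      intro h
      have h1 : bd.getLast? = (Nat.digits 10 n).getLast? := by
        rw [hbd, List.getLast?_eq_head?_reverse, List.reverse_reverse,
          pv_head?_take E sz (by omega), hE, List.head?_reverse]
      rw [List.getLast?_eq_some_getLast h, List.getLast?_eq_some_getLast hdigne] at h1
      have := Nat.getLast_digit_ne_zero 10 (show n ≠ 0 by omega)
      intro h0
      rw [Option.some_inj] at h1
      exact this (h1 ▸ h0)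
    have hdigv : Nat.digits 10 v = bd := Nat.digits_ofDigits 10 (by norm_num) bd hbdlt hbdlast
    have hvlen : (Nat.digits 10 v).length = sz := by rw [hdigv, hbdlen]
    have hvub : v < 10 ^ sz := by
      have := (Nat.digits_length_le_iff (by norm_num : (1:Nat) < 10) v).mp (le_of_eq hvlen)
      exact this
    have hvlb : 10 ^ (sz - 1) ≤ v := by
      have := (Nat.lt_digits_length_iff (by norm_num : (1:Nat) < 10) v).mp
        (by omega : sz - 1 < (Nat.digits 10 v).length)
      exact this
    refine ⟨sz, by omega, by omega, (v : Int), ?_, ?_, k, hk2, ?_⟩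
    · exact_mod_cast hvlb
    · exact_mod_cast hvub
    · rw [hxn, hnv]
      rw [show ((10:Int) ^ sz) = (((10 ^ sz : Nat) : Int)) from by push_cast; ring,
        pvGeom_eq_ngeom]
      push_cast
      ring
  · rintro ⟨sz, hsz1, hsz5, vI, hv1, hv2, k, hk2, hxeq⟩
    have hvpos : (1 : Int) ≤ vI := le_trans (one_le_pow₀ (by norm_num)) hv1
    set v : Nat := vI.toNat with hv
    have hvI : vI = (v : Int) := by omega
    have hnv : n = v * pvNGeom (10 ^ sz) k := by
      have : x = ((v * pvNGeom (10 ^ sz) k : Nat) : Int) := by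
        rw [hxeq, hvI, show ((10:Int) ^ sz) = (((10 ^ sz : Nat) : Int)) from by push_cast; ring,
          pvGeom_eq_ngeom]
        push_cast
        ring
      omega
    set bd := Nat.digits 10 v with hbd
    have hvlb : 10 ^ (sz - 1) ≤ v := by
      rw [hvI] at hv1
      exact_mod_cast hv1
    have hvub : v < 10 ^ sz := by
      rw [hvI] at hv2
      exact_mod_cast hv2
    have hbdlen : bd.length = sz := by
      have h1 : bd.length ≤ sz := (Nat.digits_length_le_iff (by norm_num) v).mpr hvub
      have h2 : sz - 1 < bd.length := (Nat.lt_digits_length_iff (by norm_num) v).mpr hvlb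
      omega
    have hvne : v ≠ 0 := by
      have := Nat.one_le_pow (sz - 1) 10 (by norm_num)
      omega
    have hbdne : bd ≠ [] := Nat.digits_ne_nil_iff_ne_zero.mpr hvne
    set L := (List.replicate k bd).flatten with hL
    have hLlt : ∀ d ∈ L, d < 10 := fun d hd =>
      Nat.digits_lt_base (by norm_num) (pv_mem_flatten_replicate hd)
    have hLlast : ∀ h : L ≠ [], L.getLast h ≠ 0 := by
      intro h
      have h1 : L.getLast? = bd.getLast? := pv_flatten_getLast? k (by omega) bd hbdne
      rw [List.getLast?_eq_some_getLast h, List.getLast?_eq_some_getLast hbdne] at h1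
      rw [Option.some_inj] at h1
      have := Nat.getLast_digit_ne_zero 10 hvne
      intro h0
      exact this (h1 ▸ h0)
    have hdigeq : Nat.digits 10 n = L := by
      have hofd : Nat.ofDigits 10 L = n := by
        rw [hL, pv_ofDigits_flatten, hbdlen, hbd, Nat.ofDigits_digits, hnv]
      rw [← hofd, Nat.digits_ofDigits 10 (by norm_num) L hLlt hLlast]
    have hLlen : L.length = k * sz := by rw [hL, pv_flatten_length, hbdlen]
    have hElen : E.length = k * sz := by rw [hE, List.length_reverse, hdigeq, hLlen]
    have hszlt : sz < k * sz := by nlinarith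
    constructor
    · rw [hlen, hElen]
      simp only [Bool.not_eq_eq_eq_not, Bool.not_true, decide_eq_false_iff_not, not_lt]
      push_cast
      omega
    · refine ⟨(sz : Int), ?_, ?_, ?_⟩
      · rw [PySem.List.mem_pyRange_one, hlen, hElen]
        constructor
        · omega
        · rw [lt_min_iff]
          constructor
          · push_cast; omega
          · omega
      · rw [hlen, hElen, PySem.Int.mod_eq_zero_iff_dvd]
        exact ⟨(k : Int), by push_cast; ring⟩
      · rw [hlen, hElen]
        have hfd : PySem.Int.floordiv ((k * sz : Nat) : Int) ((sz : Nat) : Int) = (k : Int) := by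
          rw [PySem.Int.floordiv_eq_iff_of_pos (by omega)]
          push_cast
          constructor
          · nlinarith
          · nlinarith [show (1:Int) ≤ (sz:Int) by exact_mod_cast hsz1]
        have hBchars : PySem.List.slice (PySem.Int.toChars x) none (some ((sz : Nat) : Int)) =
            (PySem.Int.toChars x).take sz := by
          rw [PySem.List.slice_to _ (by positivity)]
          simp
        rw [hfd, hBchars]
        -- E is k copies of Bd := bd.reverse
        set Bd := bd.reverse with hBd
        have hBdlen : Bd.length = sz := by rw [hBd, List.length_reverse, hbdlen]
        have hEflat : E = (List.replicate k Bd).flatten := by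
          rw [hE, hdigeq, hL, pv_flatten_reverse]
        have htake : E.take sz = Bd := by
          obtain ⟨k', rfl⟩ : ∃ k', k = k' + 1 := ⟨k - 1, by omega⟩
          rw [hEflat, List.replicate_succ, List.flatten_cons, ← hBdlen, List.take_left]
        rw [hcsE, ← List.map_take, htake, PySem.List.pyRepeat,
          show ((k : Nat) : Int).toNat = k from by omega,
          ← List.map_replicate, ← List.map_flatten, ← hEflat]

theorem pvForm_ge (x : Int) (h : pvForm x) : 11 ≤ x := by
  obtain ⟨sz, h1, h5, v, hv1, hv2, k, hk, rfl⟩ := h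
  have hv : (1 : Int) ≤ v := le_trans (one_le_pow₀ (by norm_num)) hv1
  have hm : (10 : Nat) ≤ 10 ^ sz := by
    calc (10 : Nat) = 10 ^ 1 := by ring
    _ ≤ 10 ^ sz := Nat.pow_le_pow_right (by norm_num) h1
  have hg : (11 : Int) ≤ pvGeom (10 ^ sz) k := by
    have := pvNGeom_ge (10 ^ sz) hm k hk
    have hcast : pvGeom ((10 : Int) ^ sz) k = ((pvNGeom (10 ^ sz) k : Nat) : Int) := by
      rw [show ((10 : Int) ^ sz) = (((10 ^ sz : Nat) : Int)) from by push_cast; ring]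
      exact pvGeom_eq_ngeom _ k
    rw [hcast]
    have : 10 ^ sz + 1 ≤ pvNGeom (10 ^ sz) k := this
    omega
  nlinarith

theorem pvValid_neg (x : Int) (hx : x < 0) : pvValid x = false := by
  rw [pvValid_eq]
  set cs := PySem.Int.toChars x with hcs
  by_contra hbool
  have hfound : pvFoundA cs ((cs.length : Int))
      (PySem.List.pyRange 1 (min ((cs.length : Int)) 6) 1) = true := by
    cases hf : pvFoundA cs ((cs.length : Int)) (PySem.List.pyRange 1 (min ((cs.length : Int)) 6) 1) <;>
      simp [hf] at hbool ⊢
  obtain ⟨size, hmem, hmod, hrep⟩ := (pvFoundA_iff _ _ _).mp hfound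
  rw [PySem.List.mem_pyRange_one] at hmem
  obtain ⟨hs1, hs2⟩ := hmem
  have hsl : size < (cs.length : Int) := lt_of_lt_of_le hs2 (min_le_left _ _)
  have hdvd : size ∣ (cs.length : Int) := (PySem.Int.mod_eq_zero_iff_dvd _ _).mp hmod
  obtain ⟨c, hc⟩ := hdvd
  have hc2 : 2 ≤ c := by nlinarith
  have hfd : PySem.Int.floordiv ((cs.length : Int)) size = c := by
    rw [PySem.Int.floordiv_eq_iff_of_pos (by omega)]
    constructor
    · rw [hc]; ring_nf; nlinarith
    · rw [hc]; nlinarith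
  -- expand the repeated-block equation into a character count contradiction
  have hD : cs = '-' :: Nat.toDigits 10 x.natAbs := by
    rw [hcs, PySem.Int.toChars, if_pos hx]
  have hcount1 : cs.count '-' = 1 := by
    rw [hD]
    have : (Nat.toDigits 10 x.natAbs).count '-' = 0 := by
      rw [List.count_eq_zero]
      intro hmem'
      obtain ⟨d, hd, hdc⟩ := pv_toDigits_mem _ _ hmem'
      exact pv_dc_ne_dash d hd hdc.symm
    simp [this]
  have hB : PySem.List.slice cs none (some size) = cs.take size.toNat :=
    PySem.List.slice_to cs (by omega)
  have hBdash : '-' ∈ cs.take size.toNat := by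
    rw [hD]
    rw [List.take_cons (by omega)]
    simp
  have hrep' : cs = (List.replicate c.toNat (cs.take size.toNat)).flatten := by
    conv_lhs => rw [hrep]
    rw [hB, hfd]
    rfl
  have hcount2 : cs.count '-' = c.toNat * (cs.take size.toNat).count '-' := by
    conv_lhs => rw [hrep']
    exact pv_flatten_count _ _ _
  have : 1 ≤ (cs.take size.toNat).count '-' := List.one_le_count_iff.mpr hBdash
  have : 2 ≤ c.toNat * (cs.take size.toNat).count '-' := by
    calc 2 ≤ c.toNat * 1 := by omega
    _ ≤ c.toNat * (cs.take size.toNat).count '-' := Nat.mul_le_mul_left _ this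
  omega

theorem pvValid_small (x : Int) (hx0 : 0 ≤ x) (hx9 : x ≤ 9) : pvValid x = false := by
  rw [pvValid_eq]
  have hchars : PySem.Int.toChars x = Nat.toDigits 10 x.toNat := by
    rw [PySem.Int.toChars, if_neg (by omega)]
  have hlen : (PySem.Int.toChars x).length = 1 := by
    rw [hchars]
    rcases Nat.eq_zero_or_pos x.toNat with h0 | hpos
    · rw [h0, pv_toDigits_zero]; rfl
    · rw [pv_toDigits_eq _ hpos]
      simp only [List.length_reverse, List.length_map]
      have hle : (Nat.digits 10 x.toNat).length ≤ 1 :=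
        (Nat.digits_length_le_iff (by norm_num) _).mpr (by omega)
      have hne : Nat.digits 10 x.toNat ≠ [] := Nat.digits_ne_nil_iff_ne_zero.mpr (by omega)
      have := List.length_pos_iff.mpr hne
      omega
  rw [hlen]
  simp

-- A's per-number test holds exactly on the numbers B enumerates
theorem pvValid_iff_form (x : Int) : pvValid x = true ↔ pvForm x := by
  rcases lt_or_ge x 0 with hneg | hpos
  · rw [pvValid_neg x hneg]
    simp only [Bool.false_eq_true, false_iff]
    intro h
    have := pvForm_ge x h
    omega
  · rcases le_or_gt x 9 with hsmall | hbig
    · rw [pvValid_small x hpos hsmall]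
      simp only [Bool.false_eq_true, false_iff]
      intro h
      have := pvForm_ge x h
      omega
    · exact pvValid_iff_form_main x (by omega)

-- A's fold = fold of pvUpd over the filtered range
theorem pvA_eq_fold (a b : Int) :
    find_invalids a b = ((PySem.List.pyRange a (b + 1) 1).filter pvValid).foldl pvUpd (0, []) := by
  rw [List.foldl_filter]
  unfold find_invalids
  congr 1
  funext st i
  simp only [pvValid, pvUpd]
  split_ifs <;> simp_all

theorem pvB_eq_fold (a b : Int) :
    find_invalids_alt a b = ((PySem.List.pyRange a (b + 1) 1).filter pvValid).foldl pvUpd (0, []) := by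
  have hstep : find_invalids_alt a b =
      (PySem.List.sorted ((PySem.List.pyRange 1 6 1).foldl (fun nums size =>
        let m : Int := 10 ^ size.toNat
        (PySem.List.pyRange (PySem.Int.floordiv m 10) m 1).foldl (fun nums block =>
          pvWhileB a b m block (block * m + block) nums) nums) (PySem.Set.empty : PySem.Set Int))
        (fun x => x) false).foldl pvUpd (0, []) := rfl
  rw [hstep]
  rw [PySem.List.sorted_eq_of_perm_of_pairwise_lt _ _ _ ?hperm ?hpair]
  case hperm =>
    rw [List.perm_ext_iff_of_nodup
      (List.Nodup.filter _ (PySem.List.nodup_pyRange_one a (b + 1))) (pvNums_nodup a b)]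
    intro x
    rw [List.mem_filter, PySem.List.mem_pyRange_one, pvNums_mem a b x, pvValid_iff_form]
    constructor
    · rintro ⟨⟨hax, hxb⟩, hform⟩; exact ⟨hax, by omega, hform⟩
    · rintro ⟨hax, hxb, hform⟩; exact ⟨⟨hax, by omega⟩, hform⟩
  case hpair =>
    exact List.Pairwise.filter _ (PySem.List.pairwise_lt_pyRange_one a (b + 1))

-- ===== VERDICT (by name: the statement is the Claim_ definition above) =====
theorem find_invalids_spec : Claim_equal_find_invalids := by
  intro a b _
  unfold Spec_find_invalids
  rw [pvA_eq_fold, pvB_eq_fold]
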